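-- pv_equiv track=rewrite | github.com/1ang1ang/leetcode | com/guoyang/leetcode/easy/LongestHarmoniousSubsequence.py | findLHS
-- ===== SOURCE A (Python) =====
-- def findLHS(nums):
--     """
--     :type nums: List[int]
--     :rtype: int
--     """
--     if len(nums) == 0:
--         return 0
--     numVsCnt = {}
--     for num in nums:
--         numVsCnt[num] = numVsCnt.get(num,0) + 1
--     result = {}
--
--     for key,val in numVsCnt.items():
--         if numVsCnt.get(key,0) == 0 or numVsCnt.get(key + 1,0) == 0:
--             continue
--         result[key] = numVsCnt.get(key,0) + numVsCnt.get(key + 1,0)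
--     if len(result) == 0:
--         return 0
--     return max(result.values())
-- ===== SOURCE B (Python) =====
-- def findLHS(nums):
--     """
--     :type nums: List[int]
--     :rtype: int
--     """
--     runs = []  # (value, multiplicity) runs of sorted(nums), values strictly increasing
--     for v in sorted(nums):
--         if runs and runs[-1][0] == v:
--             runs[-1] = (v, runs[-1][1] + 1)
--         else:
--             runs.append((v, 1))
--     best = 0
--     for (a, ca), (b, cb) in zip(runs, runs[1:]):
--         if b - a == 1:
--             best = max(best, ca + cb)
--     return best
-- ===== Notes on version B (the rewrite author's own statement) =====
-- stated objective: alternative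
-- what changed: Replaces the two hash-map passes (counter dict, then a result dict built from key/key+1 lookups, then max over its values) with sorting nums, run-length encoding the sorted list, and taking a running max over adjacent runs whose values differ by 1.
import Mathlib
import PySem

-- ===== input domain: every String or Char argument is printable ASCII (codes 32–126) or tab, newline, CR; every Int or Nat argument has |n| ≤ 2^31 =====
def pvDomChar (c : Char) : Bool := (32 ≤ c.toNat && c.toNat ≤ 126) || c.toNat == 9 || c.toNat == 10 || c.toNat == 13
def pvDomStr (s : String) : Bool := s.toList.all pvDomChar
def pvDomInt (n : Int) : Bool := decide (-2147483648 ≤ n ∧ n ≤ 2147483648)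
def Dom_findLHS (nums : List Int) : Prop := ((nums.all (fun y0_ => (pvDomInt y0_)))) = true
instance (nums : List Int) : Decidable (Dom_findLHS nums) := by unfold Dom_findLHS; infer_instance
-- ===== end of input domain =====

-- B replaces A's two dict passes (counter dict, result dict of key/key+1 sums, max of its
-- values) by sorting nums, run-length encoding the sorted list, and taking a running max
-- over adjacent runs whose values differ by 1 (alternative algorithm, not claimed faster).

-- ===== PORT A =====
-- numVsCnt = {}; for num in nums: numVsCnt[num] = numVsCnt.get(num, 0) + 1
def pvNumVsCnt (nums : List Int) : PySem.Dict Int Int :=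
  nums.foldl (fun d num => d.insert num (d.getD num 0 + 1)) PySem.Dict.empty

-- result = {}; for key, val in numVsCnt.items(): if get(key)==0 or get(key+1)==0: continue; result[key] = get(key)+get(key+1)
def pvResult (nums : List Int) : PySem.Dict Int Int :=
  (pvNumVsCnt nums).items.foldl
    (fun r kv =>
      if (pvNumVsCnt nums).getD kv.1 0 = 0 ∨ (pvNumVsCnt nums).getD (kv.1 + 1) 0 = 0 then r
      else r.insert kv.1 ((pvNumVsCnt nums).getD kv.1 0 + (pvNumVsCnt nums).getD (kv.1 + 1) 0))
    PySem.Dict.empty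

def findLHS (nums : List Int) : Int :=
  if nums.length = 0 then 0
  else if (pvResult nums).size = 0 then 0
  -- max(result.values()): the size guard keeps the list nonempty, so the default is never used
  else (PySem.List.max? (pvResult nums).values (fun v => v)).getD 0

-- ===== PORT B =====
-- loop body of 'for v in sorted(nums)': 'runs and runs[-1][0] == v' is the getLast? match
-- (none = empty list); 'runs[-1] = (v, runs[-1][1] + 1)' replaces the last element
def pvStep (rs : List (Int × Int)) (v : Int) : List (Int × Int) :=
  match rs.getLast? with
  | some p => if p.1 = v then rs.dropLast ++ [(v, p.2 + 1)] else rs ++ [(v, 1)]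
  | none => rs ++ [(v, 1)]

def findLHS_alt (nums : List Int) : Int :=
  let runs := (PySem.List.sorted nums (fun x => x) false).foldl pvStep []
  (runs.zip (PySem.List.slice runs (some 1) none)).foldl
    (fun best pq =>
      if pq.2.1 - pq.1.1 = 1 then max best (pq.1.2 + pq.2.2)
      else best) 0

-- ===== PRECONDITION & SPEC =====
def Spec_findLHS (nums : List Int) (out : Int) : Prop := out = findLHS_alt nums
instance (nums : List Int) (out : Int) : Decidable (Spec_findLHS nums out) := by unfold Spec_findLHS; infer_instance

-- ===== CLAIM (what is proved, stated in full; the proofs are below) =====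
def Claim_equal_findLHS : Prop := ∀ (nums : List Int), Dom_findLHS nums → Spec_findLHS nums (findLHS nums)

-- ===== LEMMAS AND PROOFS =====

-- the pair-sum value and the 'has a successor in nums' predicate shared by both characterisations
def pvVal (nums : List Int) (k : Int) : Int := (nums.count k : Int) + (nums.count (k + 1) : Int)
def pvHasSucc (nums : List Int) (k : Int) : Bool := decide ((k + 1) ∈ nums)

-- A's result dict holds exactly the filtered distinct values with their pair-sums, in first-occurrence order
lemma result_items (nums : List Int) :
    (pvResult nums).items =
      ((PySem.Set.ofList nums).filter (pvHasSucc nums)).map (fun a => (a, pvVal nums a)) := by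
  unfold pvResult
  rw [show pvNumVsCnt nums = PySem.Dict.counter nums from
        PySem.Dict.foldl_insert_getD_add_one_eq_counter nums,
      PySem.Dict.items_counter, List.foldl_map]
  simp only [PySem.Dict.getD_counter]
  have hfun : (fun (r : PySem.Dict Int Int) (k : Int) =>
        if ((nums.count k : Int) = 0 ∨ (nums.count (k + 1) : Int) = 0) then r
        else r.insert k ((nums.count k : Int) + (nums.count (k + 1) : Int))) =
      (fun (r : PySem.Dict Int Int) (k : Int) =>
        if (decide (¬((nums.count k : Int) = 0 ∨ (nums.count (k + 1) : Int) = 0))) = true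
        then r.insert k ((nums.count k : Int) + (nums.count (k + 1) : Int)) else r) := by
    funext r k
    by_cases h : ((nums.count k : Int) = 0 ∨ (nums.count (k + 1) : Int) = 0)
    · rw [if_pos h, if_neg (by simp; omega)]
    · rw [if_neg h, if_pos (by simp; omega)]
  rw [hfun, ← List.foldl_filter]
  have hnd : ((PySem.Set.ofList nums).filter
      (fun k => decide (¬((nums.count k : Int) = 0 ∨ (nums.count (k + 1) : Int) = 0)))).Nodup :=
    (PySem.Set.nodup_ofList nums).filter _
  rw [PySem.Dict.items_foldl_insert_fresh _ (fun a => a) _ PySem.Dict.empty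
        (fun a _ => rfl) (by simpa using hnd)]
  have hfil : (PySem.Set.ofList nums).filter
        (fun k => decide (¬((nums.count k : Int) = 0 ∨ (nums.count (k + 1) : Int) = 0))) =
      (PySem.Set.ofList nums).filter (pvHasSucc nums) := by
    apply List.filter_congr
    intro k hk
    have hkmem : k ∈ nums := (PySem.Set.mem_ofList _ _).mp hk
    have hkcount : nums.count k ≠ 0 := by
      simpa [List.count_eq_zero] using hkmem
    simp only [pvHasSucc, decide_eq_decide, Int.natCast_eq_zero, List.count_eq_zero]
    tauto
  rw [hfil]
  simp [pvVal, PySem.Dict.empty]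

-- A computes the max (default 0) over the filtered distinct values
lemma a_char (nums : List Int) :
    findLHS nums =
      (PySem.List.max?
        (((PySem.Set.ofList nums).filter (pvHasSucc nums)).map (pvVal nums))
        (fun v => v)).getD 0 := by
  have hv : (pvResult nums).values =
      ((PySem.Set.ofList nums).filter (pvHasSucc nums)).map (pvVal nums) := by
    simp only [PySem.Dict.values, result_items, List.map_map]
    rfl
  unfold findLHS
  match nums with
  | [] => simp [PySem.Set.ofList, PySem.List.max?]
  | x :: ns =>
    rw [if_neg (by simp)]
    by_cases hsz : (pvResult (x :: ns)).size = 0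
    · rw [if_pos hsz]
      have : (pvResult (x :: ns)).values = [] := by
        have := hsz
        simp only [PySem.Dict.size] at this
        simp only [PySem.Dict.values, List.length_eq_zero_iff.mp this]
        rfl
      rw [this] at hv
      rw [← hv]
      simp [PySem.List.max?]
    · rw [if_neg hsz, hv]

-- in a strictly increasing list, the adjacent pairs at distance 1 are exactly the members whose successor is a member
lemma adj_pairs (S : List Int) (hs : S.Pairwise (· < ·)) :
    (S.zip S.tail).filter (fun p => decide (p.2 - p.1 = 1)) =
      (S.filter (fun a => decide ((a + 1) ∈ S))).map (fun a => (a, a + 1)) := by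
  induction S with
  | nil => simp
  | cons a t ih =>
    rw [List.pairwise_cons] at hs
    obtain ⟨ha, ht⟩ := hs
    match t with
    | [] => simp
    | b :: t' =>
      have hab : a < b := ha b (by simp)
      have hbt' : ∀ x ∈ t', b < x := (List.pairwise_cons.mp ht).1
      have htail : (b :: t').filter (fun x => decide ((x + 1) ∈ a :: b :: t')) =
          (b :: t').filter (fun x => decide ((x + 1) ∈ b :: t')) := by
        apply List.filter_congr
        intro x hx
        have hxa : a < x := ha x hx
        simp only [decide_eq_decide, List.mem_cons]
        constructor
        · rintro (h | h)
          · omega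
          · exact h
        · intro h; right; exact h
      have hhead : ((a + 1) ∈ (a :: b :: t')) ↔ b = a + 1 := by
        constructor
        · intro h
          rcases List.mem_cons.mp h with h | h
          · omega
          · rcases List.mem_cons.mp h with h | h
            · omega
            · have := hbt' _ h; omega
        · intro h; simp [h]
      have hRHS : (a :: b :: t').filter (fun x => decide ((x + 1) ∈ a :: b :: t')) =
          (if b = a + 1 then [a] else []) ++
            (b :: t').filter (fun x => decide ((x + 1) ∈ b :: t')) := by
        rw [List.filter_cons, htail]
        by_cases h : b = a + 1
        · rw [if_pos (by simp [h]), if_pos h]; rfl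
        · rw [if_neg (by simp [hhead, h]), if_neg h]; rfl
      rw [hRHS, List.map_append]
      have hIH := ih ht
      simp only [List.tail_cons] at hIH ⊢
      rw [List.zip_cons_cons, List.filter_cons, hIH]
      by_cases hb : b - a = 1
      · rw [if_pos (by simp [hb]), if_pos (by omega : b = a + 1)]
        simp only [List.map_cons, List.map_nil, List.cons_append, List.nil_append]
        congr 2
        omega
      · rw [if_neg (by simp [hb]), if_neg (by omega : ¬ b = a + 1)]
        simp

-- dedup (first occurrences) of a weakly increasing list is strictly increasing
lemma ofList_pairwise_lt (l : List Int) (h : l.Pairwise (· ≤ ·)) :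
    (PySem.Set.ofList l).Pairwise (· < ·) := by
  induction l using List.reverseRecOn with
  | nil => simp [PySem.Set.ofList]
  | append_singleton l v ih =>
    rw [List.pairwise_append] at h
    obtain ⟨hl, -, hle⟩ := h
    have hofl : PySem.Set.ofList (l ++ [v]) = PySem.Set.add (PySem.Set.ofList l) v := by
      simp [PySem.Set.ofList_eq_foldl, List.foldl_append]
    rw [hofl, PySem.Set.add_eq_ite]
    split_ifs with hm
    · exact ih hl
    · rw [List.pairwise_append]
      refine ⟨ih hl, by simp, ?_⟩
      intro a ha b hb
      rw [List.mem_singleton] at hb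
      subst hb
      have hal : a ∈ l := (PySem.Set.mem_ofList _ _).mp ha
      exact lt_of_le_of_ne (hle a hal b (by simp)) (fun hav => hm (hav ▸ ha))

-- B's first loop run-length encodes a sorted list: one run per distinct value, with its count
lemma rle (l : List Int) (h : l.Pairwise (· ≤ ·)) :
    l.foldl pvStep [] = (PySem.Set.ofList l).map (fun v => (v, (l.count v : Int)))
    ∧ (PySem.Set.ofList l).getLast? = l.getLast? := by
  induction l using List.reverseRecOn with
  | nil => simp [PySem.Set.ofList]
  | append_singleton l v ih =>
    rw [List.pairwise_append] at h
    obtain ⟨hl, -, hle⟩ := h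
    have hle' : ∀ x ∈ l, x ≤ v := fun x hx => hle x hx v (by simp)
    obtain ⟨ihr, ihlast⟩ := ih hl
    have hofl : PySem.Set.ofList (l ++ [v]) = PySem.Set.add (PySem.Set.ofList l) v := by
      simp [PySem.Set.ofList_eq_foldl, List.foldl_append]
    rw [List.foldl_append, List.foldl_cons, List.foldl_nil, ihr]
    match hl0 : l with
    | [] => simp [pvStep, PySem.Set.ofList, PySem.Set.add, PySem.Set.empty]
    | x :: l' =>
      set l := x :: l' with hldef
      have hlne : l ≠ [] := by simp [hldef]
      have hglmax : ∀ y ∈ l, y ≤ l.getLast hlne := by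
        intro y hy
        conv at hy => rw [← List.dropLast_append_getLast hlne]
        rcases List.mem_append.mp hy with h | h
        · have hp := List.pairwise_append.mp
            (by rw [List.dropLast_append_getLast hlne]; exact hl)
          exact hp.2.2 y h _ (by simp)
        · simp at h; omega
      have hmemiff : v ∈ l ↔ l.getLast hlne = v := by
        constructor
        · intro hv
          have h1 := hglmax v hv
          have h2 := hle' _ (List.getLast_mem hlne)
          omega
        · intro hv; rw [← hv]; exact List.getLast_mem hlne
      have hDne : PySem.Set.ofList l ≠ [] := by
        intro hD
        have : x ∈ PySem.Set.ofList l := (PySem.Set.mem_ofList _ _).mpr (by simp [hldef])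
        simp [hD] at this
      have hDlast : (PySem.Set.ofList l).getLast? = some (l.getLast hlne) := by
        rw [ihlast, List.getLast?_eq_some_getLast hlne]
      -- getLast? of the mapped list
      have hElast : ((PySem.Set.ofList l).map (fun v => (v, (l.count v : Int)))).getLast? =
          some (l.getLast hlne, (l.count (l.getLast hlne) : Int)) := by
        rw [List.getLast?_map, hDlast]; rfl
      have hnd : (PySem.Set.ofList l).Nodup := PySem.Set.nodup_ofList l
      by_cases hv : v ∈ l
      · have hgv : l.getLast hlne = v := hmemiff.mp hv
        have hD : PySem.Set.ofList (l ++ [v]) = PySem.Set.ofList l := by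
          rw [hofl, PySem.Set.add_of_mem ((PySem.Set.mem_ofList _ _).mpr hv)]
        have hDgl : (PySem.Set.ofList l).getLast hDne = v := by
          have := hDlast
          rw [hgv, List.getLast?_eq_some_getLast hDne] at this
          exact (Option.some.injEq _ _).mp this
        have hDsplit : PySem.Set.ofList l = (PySem.Set.ofList l).dropLast ++ [v] := by
          conv_lhs => rw [← List.dropLast_append_getLast (l := PySem.Set.ofList l) hDne]
          rw [hDgl]
        have hvnotdrop : v ∉ (PySem.Set.ofList l).dropLast := by
          intro hmem
          have h2 := hnd
          rw [hDsplit, List.nodup_append] at h2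
          exact h2.2.2 v hmem v (List.mem_singleton_self v) rfl
        constructor
        · -- values part
          rw [pvStep, hElast, hD, hgv]
          dsimp only
          rw [if_pos rfl]
          conv_rhs => rw [hDsplit]
          rw [List.map_append, ← List.map_dropLast]
          congr 1
          · apply List.map_congr_left
            intro x hx
            have hxv : x ≠ v := fun hxv => hvnotdrop (hxv ▸ hx)
            simp [List.count_append, Ne.symm hxv]
          · simp [List.count_append]
        · rw [hD, hDlast, hgv, List.getLast?_concat]
      · -- v not in l: append branch
        have hD : PySem.Set.ofList (l ++ [v]) = PySem.Set.ofList l ++ [v] := by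
          rw [hofl, PySem.Set.add_of_not_mem (fun hm => hv ((PySem.Set.mem_ofList _ _).mp hm))]
        have hgv : ¬ (l.getLast hlne = v) := fun hg => hv (hmemiff.mpr hg)
        constructor
        · rw [pvStep, hElast]
          dsimp only
          rw [if_neg hgv, hD, List.map_append]
          congr 1
          · apply List.map_congr_left
            intro x hx
            have hxl : x ∈ l := (PySem.Set.mem_ofList _ _).mp hx
            have hxv : x ≠ v := fun hxv => hv (hxv ▸ hxl)
            simp [List.count_append, Ne.symm hxv]
          · have : l.count v = 0 := List.count_eq_zero.mpr hv
            simp [List.count_append, this]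
        · rw [hD, List.getLast?_concat, List.getLast?_concat]

-- B computes a running max (from 0) over the same filtered values, in sorted order
lemma b_char (nums : List Int) :
    findLHS_alt nums =
      (((PySem.Set.ofList (PySem.List.sorted nums (fun x => x) false)).filter
          (pvHasSucc nums)).map (pvVal nums)).foldl max 0 := by
  set s := PySem.List.sorted nums (fun x => x) false with hsdef
  have hs : s.Pairwise (· ≤ ·) := PySem.List.sorted_pairwise nums (fun x => x)
  have hcnt : ∀ v : Int, s.count v = nums.count v := fun v =>
    (PySem.List.sorted_perm nums (fun x => x) false).count_eq v
  set M := PySem.Set.ofList s with hMdef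
  have hMlt : M.Pairwise (· < ·) := ofList_pairwise_lt s hs
  obtain ⟨hruns, -⟩ := rle s hs
  show ((s.foldl pvStep []).zip (PySem.List.slice (s.foldl pvStep []) (some 1) none)).foldl
      (fun best pq => if pq.2.1 - pq.1.1 = 1 then max best (pq.1.2 + pq.2.2) else best) 0 = _
  rw [PySem.List.slice_from_one, hruns, ← List.map_tail, List.zip_map, List.foldl_map]
  have hstep : (fun (best : Int) (pq : Int × Int) =>
        (fun pq' : (Int × Int) × (Int × Int) =>
          if pq'.2.1 - pq'.1.1 = 1 then max best (pq'.1.2 + pq'.2.2) else best)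
          (Prod.map (fun v => (v, (s.count v : Int))) (fun v => (v, (s.count v : Int))) pq)) =
      (fun (best : Int) (pq : Int × Int) =>
        if pq.2 - pq.1 = 1 then max best ((s.count pq.1 : Int) + (s.count pq.2 : Int)) else best) := by
    funext best pq
    rfl
  rw [hstep]
  have hfold : (M.zip M.tail).foldl
      (fun best pq => if pq.2 - pq.1 = 1 then max best ((s.count pq.1 : Int) + (s.count pq.2 : Int)) else best) 0 =
      ((M.zip M.tail).filter (fun pq => decide (pq.2 - pq.1 = 1))).foldl
        (fun best pq => max best ((s.count pq.1 : Int) + (s.count pq.2 : Int))) 0 := by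
    rw [List.foldl_filter]
    simp
  rw [hfold, adj_pairs M hMlt, List.foldl_map]
  have hfilter : M.filter (fun a => decide ((a + 1) ∈ M)) = M.filter (pvHasSucc nums) := by
    apply List.filter_congr
    intro x hx
    simp [pvHasSucc, hMdef, hsdef, PySem.Set.mem_ofList, PySem.List.mem_sorted]
  rw [hfilter, List.foldl_map]
  have hval : (fun (best : Int) (a : Int) => max best (pvVal nums a)) =
      (fun (best : Int) (a : Int) => max best ((s.count a : Int) + (s.count (a + 1) : Int))) := by
    funext best a
    rw [pvVal, hcnt, hcnt]
  rw [hval]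

-- max (default 0) of a list of nonnegatives equals the running max from 0 over any permutation of it
lemma max_perm (M M' : List Int) (hperm : M'.Perm M) (hpos : ∀ v ∈ M, 0 ≤ v) :
    (PySem.List.max? M (fun v => v)).getD 0 = M'.foldl max 0 := by
  match M with
  | [] =>
    have : M' = [] := hperm.eq_nil
    simp [this, PySem.List.max?]
  | x :: t =>
    obtain ⟨m, hm⟩ : ∃ m, PySem.List.max? (x :: t) (fun v => v) = some m := by
      cases h : PySem.List.max? (x :: t) (fun v => v) with
      | none => exact absurd ((PySem.List.max?_eq_none_iff _ _).mp h) (by simp)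
      | some m => exact ⟨m, rfl⟩
    rw [hm]
    have hmem : m ∈ x :: t := PySem.List.max?_mem hm
    have hmax : ∀ y ∈ x :: t, y ≤ m := fun y hy => PySem.List.max?_isMax hm y hy
    have hle := PySem.List.le_foldl_max M' (0 : Int)
    have h1 : m ≤ M'.foldl max 0 := hle.2 m (hperm.mem_iff.mpr hmem)
    have h2 : M'.foldl max 0 ≤ m := by
      rcases PySem.List.foldl_max_mem M' (0 : Int) with h | h
      · rw [h]; exact hpos m hmem
      · exact hmax _ (hperm.mem_iff.mp h)
    simp [le_antisymm h2 h1]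

-- ===== VERDICT (by name: the statement is the Claim_ definition above) =====
theorem findLHS_spec : Claim_equal_findLHS := by
  intro nums _
  unfold Spec_findLHS
  rw [a_char, b_char]
  refine max_perm _ _ (List.Perm.map _ (List.Perm.filter _ ?_)) ?_
  · rw [List.perm_ext_iff_of_nodup (PySem.Set.nodup_ofList _) (PySem.Set.nodup_ofList _)]
    intro a
    simp [PySem.Set.mem_ofList, PySem.List.mem_sorted]
  · intro v hv
    obtain ⟨k, -, rfl⟩ := List.mem_map.mp hv
    unfold pvVal
    positivity
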